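-- pv_equiv track=rewrite | github.com/aaghpun-prog/ClearComm | modules/homonym_detector.py | _deduplicate_by_meaning
-- ===== SOURCE A (Python) =====
-- def _deduplicate_by_meaning(results: list) -> list:
--     """
--     Smart deduplication for multi-occurrence results of the SAME word.
--     Selects the best-confidence result per unique meaning.
--     Demo-safety: if all occurrences resolved to the same meaning,
--     return all original results instead of collapsing.
--     """
--     if len(results) <= 1:
--         return results
--
--     # Confidence ranking for comparison
--     conf_rank = {'high': 3, 'medium': 2, 'low': 1}
--
--     # Build best result per unique meaning
--     seen_meanings = {}
--     for r in results:
--         meaning = r.get('meaning', '')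
--         rank = conf_rank.get(r.get('confidence', 'low'), 0)
--
--         if meaning not in seen_meanings or rank > conf_rank.get(seen_meanings[meaning].get('confidence', 'low'), 0):
--             seen_meanings[meaning] = r
--
--     # Demo-safety: do NOT collapse when all occurrences share the same meaning
--     if len(results) > 1 and len(seen_meanings) == 1:
--         return results
--
--     return list(seen_meanings.values())
-- ===== SOURCE B (Python) =====
-- def _deduplicate_by_meaning(results: list) -> list:
--     if len(results) <= 1:
--         return results
--     conf_rank = {'high': 3, 'medium': 2, 'low': 1}
--     # group results by meaning, preserving first-seen order of meanings
--     groups = {}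
--     for r in results:
--         groups.setdefault(r.get('meaning', ''), []).append(r)
--     if len(groups) == 1:
--         return results
--     return [max(grp, key=lambda r: conf_rank.get(r.get('confidence', 'low'), 0))
--             for grp in groups.values()]
-- ===== Notes on version B (the rewrite author's own statement) =====
-- stated objective: alternative
-- what changed: B groups all results by meaning in one dict of lists and then reduces each group with max(key=confidence rank), instead of A's streaming best-so-far dict updated per element.
import Mathlib
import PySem

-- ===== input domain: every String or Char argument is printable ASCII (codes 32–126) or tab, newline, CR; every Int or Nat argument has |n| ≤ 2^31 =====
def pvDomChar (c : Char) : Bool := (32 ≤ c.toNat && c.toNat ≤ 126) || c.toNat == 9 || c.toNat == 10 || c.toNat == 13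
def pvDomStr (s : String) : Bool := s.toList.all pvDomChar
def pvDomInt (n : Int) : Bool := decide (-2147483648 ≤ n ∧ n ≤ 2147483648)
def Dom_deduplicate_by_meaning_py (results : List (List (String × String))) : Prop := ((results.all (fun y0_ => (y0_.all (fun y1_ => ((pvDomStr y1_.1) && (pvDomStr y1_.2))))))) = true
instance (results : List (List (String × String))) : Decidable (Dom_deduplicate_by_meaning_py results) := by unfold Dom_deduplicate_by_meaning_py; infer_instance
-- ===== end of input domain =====

-- B re-implements A by grouping all results per meaning first and then reducing each
-- group with Python's max (first maximal wins), instead of A's streaming best-so-far dict;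
-- objective: alternative decomposition, same observable behaviour. Return value only; neither mutates.

-- shared helper: the conf_rank dict and the rank lookup conf_rank.get(r.get('confidence','low'), 0)
def pyConfRank : PySem.Dict String Int := PySem.Dict.mk [("high", 3), ("medium", 2), ("low", 1)]

def pyRank (r : List (String × String)) : Int :=
  pyConfRank.getD ((PySem.Dict.mk r).getD "confidence" "low") 0

-- ===== PORT A =====
-- loop body of A's for-loop; seen[meaning] is read via getD with [] — the default is only
-- reachable when `meaning ∉ seen`, in which case Python's `or` short-circuits, so exact.
def pyStepA (seen : PySem.Dict String (List (String × String))) (r : List (String × String)) :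
    PySem.Dict String (List (String × String)) :=
  let meaning := (PySem.Dict.mk r).getD "meaning" ""
  let rank := pyRank r
  if seen.contains meaning = false ∨ pyRank (seen.getD meaning []) < rank
  then seen.insert meaning r else seen

def deduplicate_by_meaning_py (results : List (List (String × String))) : List (List (String × String)) :=
  if results.length ≤ 1 then results
  else
    let seen := results.foldl pyStepA PySem.Dict.empty
    if 1 < results.length ∧ seen.size = 1 then results
    else seen.values

-- ===== PORT B =====
-- loop body of B's grouping loop: groups.setdefault(r.get('meaning',''), []).append(r)
def pyStepB (g : PySem.Dict String (List (List (String × String)))) (r : List (String × String)) :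
    PySem.Dict String (List (List (String × String))) :=
  g.modify ((PySem.Dict.mk r).getD "meaning" "") [] (· ++ [r])

-- Python's max(grp, key=rank): first maximal element; ported by hand, exact on nonempty
-- lists ([] case unreachable: groups are never empty)
def pyMaxGroup (grp : List (List (String × String))) : List (String × String) :=
  match grp with
  | [] => []
  | x :: t => t.foldl (fun cur y => if pyRank cur < pyRank y then y else cur) x

def deduplicate_by_meaning_py_alt (results : List (List (String × String))) : List (List (String × String)) :=
  if results.length ≤ 1 then results
  else
    let groups := results.foldl pyStepB PySem.Dict.empty
    if groups.size = 1 then results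
    else groups.values.map pyMaxGroup

-- ===== PRECONDITION & SPEC =====
def Spec_deduplicate_by_meaning_py (results : List (List (String × String))) (out : List (List (String × String))) : Prop := out = deduplicate_by_meaning_py_alt results
instance (results : List (List (String × String))) (out : List (List (String × String))) : Decidable (Spec_deduplicate_by_meaning_py results out) := by unfold Spec_deduplicate_by_meaning_py; infer_instance

-- ===== CLAIM (what is proved, stated in full; the proofs are below) =====
def Claim_equal_deduplicate_by_meaning_py : Prop := ∀ (results : List (List (String × String))), Dom_deduplicate_by_meaning_py results → Spec_deduplicate_by_meaning_py results (deduplicate_by_meaning_py results)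

-- ===== LEMMAS AND PROOFS =====

-- A's per-meaning best result is exactly Python's max over B's group for that meaning
def pvF (p : String × List (List (String × String))) : String × List (String × String) :=
  (p.1, pyMaxGroup p.2)

lemma pyMaxGroup_concat (grp : List (List (String × String))) (r : List (String × String))
    (h : grp ≠ []) :
    pyMaxGroup (grp ++ [r]) =
      if pyRank (pyMaxGroup grp) < pyRank r then r else pyMaxGroup grp := by
  cases grp with
  | nil => exact absurd rfl h
  | cons x t => simp [pyMaxGroup, List.foldl_append]

lemma step_inv (g : PySem.Dict String (List (List (String × String))))
    (s : PySem.Dict String (List (String × String))) (r : List (String × String))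
    (hs : s.items = g.items.map pvF)
    (hnd : (g.items.map Prod.fst).Nodup)
    (hne : ∀ p ∈ g.items, p.2 ≠ []) :
    (pyStepA s r).items = (pyStepB g r).items.map pvF ∧
    ((pyStepB g r).items.map Prod.fst).Nodup ∧
    (∀ p ∈ (pyStepB g r).items, p.2 ≠ []) := by
  unfold pyStepA pyStepB
  simp only [PySem.Dict.modify]
  generalize hm : (PySem.Dict.mk r).getD "meaning" "" = m
  have hcont : s.contains m = g.contains m := by
    rw [PySem.Dict.contains, PySem.Dict.contains, hs, List.any_map]; rfl
  by_cases hc : g.contains m = true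
  · -- meaning already seen: A may replace in place, B appends r to the group
    have hsc : s.contains m = true := by rw [hcont]; exact hc
    obtain ⟨q, hq_find⟩ : ∃ q, g.items.find? (fun p => p.1 == m) = some q := by
      cases hfind : g.items.find? (fun p => p.1 == m) with
      | some q => exact ⟨q, rfl⟩
      | none =>
        obtain ⟨p, hp, hpm⟩ := List.any_eq_true.mp hc
        exact absurd hpm (by simpa using List.find?_eq_none.mp hfind p hp)
    have hq_mem : q ∈ g.items := List.mem_of_find?_eq_some hq_find
    have hq_key : q.1 = m := by simpa using List.find?_some hq_find
    have hgget : g.get? m = some q.2 := by simp [PySem.Dict.get?, hq_find]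
    have hggetD : g.getD m [] = q.2 := by simp [PySem.Dict.getD, hgget]
    have hsget : s.getD m [] = pyMaxGroup q.2 := by
      simp only [PySem.Dict.getD, PySem.Dict.get?, hs, List.find?_map]
      have : (fun (p : String × List (String × String)) => p.1 == m) ∘ pvF
          = fun p => p.1 == m := by funext p; rfl
      rw [this, hq_find]; rfl
    have hqne : q.2 ≠ [] := hne q hq_mem
    have hkey_eq : ∀ p ∈ g.items, p.1 = m → p = q :=
      fun p hp hpm => List.inj_on_of_nodup_map hnd hp hq_mem (hpm.trans hq_key.symm)
    -- B's new items: replace the group in place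
    have hBitems : (g.insert m (g.getD m [] ++ [r])).items
        = g.items.map (fun p => if p.1 == m then (m, q.2 ++ [r]) else p) := by
      simp [PySem.Dict.insert, hc, hggetD]
    have hmax := pyMaxGroup_concat q.2 r hqne
    refine ⟨?_, ?_, ?_⟩
    · by_cases hlt : pyRank (s.getD m []) < pyRank r
      · -- strictly better confidence: A replaces, max of the extended group is r
        rw [if_pos (Or.inr hlt)]
        have hr_max : pyMaxGroup (q.2 ++ [r]) = r := by
          rw [hmax, if_pos (hsget ▸ hlt)]
        have hAins : (s.insert m r).items
            = s.items.map (fun p => if p.1 == m then (m, r) else p) := by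
          simp [PySem.Dict.insert, hsc]
        rw [hAins, hBitems, hs, List.map_map, List.map_map]
        apply List.map_congr_left
        intro p hp
        by_cases hpm : p.1 = m
        · simp [Function.comp, pvF, hpm, hr_max]
        · simp [Function.comp, pvF, hpm]
      · -- not better: A keeps, max of the extended group is the old max
        have hnc : ¬ (s.contains m = false ∨ pyRank (s.getD m []) < pyRank r) := by
          simp [hsc, hlt]
        rw [if_neg hnc, hBitems, List.map_map, hs]
        apply List.map_congr_left
        intro p hp
        by_cases hpm : p.1 = m
        · have hpq : p = q := hkey_eq p hp hpm
          have : pyMaxGroup (q.2 ++ [r]) = pyMaxGroup q.2 := by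
            rw [hmax, if_neg (hsget ▸ hlt)]
          simp [Function.comp, pvF, hpq, this, hq_key]
        · simp [Function.comp, pvF, hpm]
    · rw [hBitems, List.map_map]
      have : ((fun (p : String × List (List (String × String))) => Prod.fst p) ∘
          fun p => if p.1 == m then (m, q.2 ++ [r]) else p) = Prod.fst := by
        funext p; by_cases hpm : p.1 = m <;> simp [hpm]
      rw [this]; exact hnd
    · intro p hp
      rw [hBitems] at hp
      obtain ⟨p0, hp0, hp0e⟩ := List.mem_map.mp hp
      by_cases hpm : p0.1 = m
      · simp [hpm] at hp0e; subst hp0e; simp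
      · simp [hpm] at hp0e; subst hp0e; exact hne p0 hp0
  · -- new meaning: both append a fresh entry
    have hsc : s.contains m = false := by rw [hcont]; exact eq_false_of_ne_true hc
    have hgget : g.get? m = none := by
      rw [PySem.Dict.get?]
      rw [List.find?_eq_none.mpr ?_]
      · rfl
      · intro p hp hpm
        exact hc (List.any_eq_true.mpr ⟨p, hp, hpm⟩)
    have hggetD : g.getD m [] = [] := by simp [PySem.Dict.getD, hgget]
    have hmnot : ∀ p ∈ g.items, ¬ (p.1 = m) := by
      intro p hp hpm
      exact hc (List.any_eq_true.mpr ⟨p, hp, by simpa using hpm⟩)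
    rw [if_pos (Or.inl hsc)]
    have hA : (s.insert m r).items = s.items ++ [(m, r)] := by
      simp [PySem.Dict.insert, hsc]
    have hB : (g.insert m (g.getD m [] ++ [r])).items = g.items ++ [(m, [r])] := by
      simp [PySem.Dict.insert, hc, hggetD]
    refine ⟨?_, ?_, ?_⟩
    · rw [hA, hB, List.map_append, hs]; rfl
    · rw [hB, List.map_append, List.nodup_append]
      refine ⟨hnd, by simp, ?_⟩
      intro x hx y hy heq
      obtain ⟨p, hp, hpe⟩ := List.mem_map.mp hx
      have hym : y = m := by simpa using hy
      exact hmnot p hp (hpe.trans (heq.trans hym))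
    · intro p hp
      rw [hB] at hp
      rcases List.mem_append.mp hp with h | h
      · exact hne p h
      · simp at h; subst h; simp

lemma fold_inv (l : List (List (String × String))) :
    ∀ (g : PySem.Dict String (List (List (String × String))))
      (s : PySem.Dict String (List (String × String))),
    s.items = g.items.map pvF →
    (g.items.map Prod.fst).Nodup →
    (∀ p ∈ g.items, p.2 ≠ []) →
    (l.foldl pyStepA s).items = (l.foldl pyStepB g).items.map pvF := by
  induction l with
  | nil => intro g s hs _ _; simpa using hs
  | cons r t ih =>
    intro g s hs hnd hne
    obtain ⟨h1, h2, h3⟩ := step_inv g s r hs hnd hne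
    simpa using ih (pyStepB g r) (pyStepA s r) h1 h2 h3

-- ===== VERDICT (by name: the statement is the Claim_ definition above) =====
theorem deduplicate_by_meaning_py_spec : Claim_equal_deduplicate_by_meaning_py := by
  intro results _
  unfold Spec_deduplicate_by_meaning_py deduplicate_by_meaning_py deduplicate_by_meaning_py_alt
  by_cases hlen : results.length ≤ 1
  · simp [hlen]
  · have h := fold_inv results PySem.Dict.empty PySem.Dict.empty (by rfl) (by simp [PySem.Dict.empty]) (by simp [PySem.Dict.empty])
    simp only [if_neg hlen]
    have hsize : (results.foldl pyStepA PySem.Dict.empty).size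
        = (results.foldl pyStepB PySem.Dict.empty).size := by
      simp [PySem.Dict.size, h]
    have hgt : 1 < results.length := by omega
    by_cases h1 : (results.foldl pyStepB PySem.Dict.empty).size = 1
    · simp [hsize, h1, hgt]
    · have : ¬ (1 < results.length ∧ (results.foldl pyStepA PySem.Dict.empty).size = 1) := by
        rw [hsize]; tauto
      simp only [if_neg this, if_neg h1]
      simp [PySem.Dict.values, h, pvF, Function.comp]
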